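-- pv_equiv track=rewrite | github.com/miliar/Code_Jam_Webscraper | solutions_python/Problem_178/772.py | solve
-- ===== SOURCE A (Python) =====
-- def solve(p):
--     p = [pi=="+" for pi in p[::-1]]
--
--     flips = 0
--     ok = True
--     for i in p:
--         if i != ok:
--             flips += 1
--             ok = not ok
--
--     return flips
-- ===== SOURCE B (Python) =====
-- def solve(p):
--     q = [c == "+" for c in p]
--     if not q:
--         return 0
--     flips = sum(1 for a, b in zip(q, q[1:]) if a != b)
--     return flips + (0 if q[-1] else 1)
-- ===== Notes on version B (the rewrite author's own statement) =====
-- stated objective: alternative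
-- what changed: Replaces A's reversed stateful toggle scan with a forward count of adjacent sign transitions (zip with the tail) plus a boundary term for the last character.
import Mathlib
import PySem

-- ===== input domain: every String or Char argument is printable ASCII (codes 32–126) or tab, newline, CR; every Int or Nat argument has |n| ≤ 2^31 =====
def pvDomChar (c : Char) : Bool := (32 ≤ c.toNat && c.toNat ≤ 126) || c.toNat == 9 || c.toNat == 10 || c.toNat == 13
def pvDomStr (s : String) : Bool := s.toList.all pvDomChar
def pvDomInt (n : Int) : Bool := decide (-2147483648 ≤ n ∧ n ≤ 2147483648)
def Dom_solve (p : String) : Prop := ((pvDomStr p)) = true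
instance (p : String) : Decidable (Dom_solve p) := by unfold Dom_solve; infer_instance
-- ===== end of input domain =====

-- B replaces A's reversed stateful toggle scan with a forward count of adjacent
-- transitions plus a boundary term for the last character (alternative decomposition).

-- ===== PORT A =====
def solve (p : String) : Int :=
  ((p.toList.reverse.map (fun c => c == '+')).foldl
    (fun (st : Int × Bool) i => if i ≠ st.2 then (st.1 + 1, !st.2) else st)
    ((0 : Int), true)).1

-- ===== PORT B =====
def solve_alt (p : String) : Int :=
  match p.toList.map (fun c => c == '+') with
  | [] => 0
  | x :: t =>
      (((x :: t).zip t).foldl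
        (fun (acc : Int) ab => if ab.1 ≠ ab.2 then acc + 1 else acc) 0)
        + (if t.getLastD x then 0 else 1)

-- ===== PRECONDITION & SPEC =====
def Spec_solve (p : String) (out : Int) : Prop := out = solve_alt p
instance (p : String) (out : Int) : Decidable (Spec_solve p out) := by unfold Spec_solve; infer_instance

-- ===== CLAIM (what is proved, stated in full; the proofs are below) =====
def Claim_equal_solve : Prop := ∀ (p : String), Dom_solve p → Spec_solve p (solve p)

-- ===== LEMMAS AND PROOFS =====

/-- Number of adjacent differing pairs in a boolean list. -/
def transCnt : List Bool → Int
  | [] => 0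
  | [_] => 0
  | a :: b :: t => (if a ≠ b then 1 else 0) + transCnt (b :: t)

/-- A's fold: the flip count is the transition count of `ok :: l`, and the final
    `ok` is the last element of the processed list (default the initial `ok`). -/
theorem foldA_eq (l : List Bool) (acc : Int) (ok : Bool) :
    l.foldl (fun (st : Int × Bool) i => if i ≠ st.2 then (st.1 + 1, !st.2) else st) (acc, ok)
      = (acc + transCnt (ok :: l), l.getLastD ok) := by
  induction l generalizing acc ok with
  | nil => simp [transCnt]
  | cons i t ih =>
      by_cases h : i = ok
      · subst h
        simp only [List.foldl_cons]
        rw [if_neg (fun hc => hc rfl), ih, List.getLastD_cons]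
        have h1 : transCnt (i :: i :: t) = transCnt (i :: t) := by
          simp [transCnt]
        rw [h1]
      · have hi : (!ok) = i := by cases ok <;> cases i <;> simp_all
        simp only [List.foldl_cons, if_pos h]
        rw [hi, ih, List.getLastD_cons]
        have h1 : transCnt (ok :: i :: t) = 1 + transCnt (i :: t) := by
          simp only [transCnt, if_pos (Ne.symm h)]
        rw [h1, show acc + 1 + transCnt (i :: t) = acc + (1 + transCnt (i :: t)) from by omega]

/-- B's fold over the zipped adjacent pairs is the transition count. -/
theorem foldB_eq (l : List Bool) (acc : Int) :
    (l.zip l.tail).foldl (fun (acc : Int) ab => if ab.1 ≠ ab.2 then acc + 1 else acc) acc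
      = acc + transCnt l := by
  induction l generalizing acc with
  | nil => simp [transCnt]
  | cons a t ih =>
      cases t with
      | nil => simp [transCnt]
      | cons b t' =>
          simp only [List.tail_cons] at ih ⊢
          simp only [List.zip_cons_cons, List.foldl_cons]
          rw [ih]
          simp only [transCnt]
          split_ifs <;> omega

theorem transCnt_append_single (x : Bool) (t : List Bool) (a : Bool) :
    transCnt ((x :: t) ++ [a]) = transCnt (x :: t) + (if t.getLastD x ≠ a then 1 else 0) := by
  induction t generalizing x with
  | nil => simp only [transCnt, List.cons_append, List.nil_append, List.getLastD_nil]
           split_ifs <;> omega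
  | cons y t' ih =>
      simp only [List.cons_append, transCnt, List.getLastD_cons]
      have := ih y
      simp only [List.cons_append] at this
      omega

theorem getLast?_consD (a : Bool) (l : List Bool) : (a :: l).getLast? = some (l.getLastD a) := by
  induction l generalizing a <;> simp_all [List.getLast?_cons]

theorem transCnt_reverse (l : List Bool) : transCnt l.reverse = transCnt l := by
  induction l with
  | nil => rfl
  | cons x t ih =>
      cases t with
      | nil => rfl
      | cons y t' =>
          obtain ⟨z, r, hr⟩ := List.exists_cons_of_ne_nil
            (l := (y :: t').reverse) (by simp)
          have h1 : (z :: r).getLast? = some y := by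
            rw [← hr, List.getLast?_reverse]; rfl
          have hzr : r.getLastD z = y :=
            (Option.some.inj (h1.symm.trans (getLast?_consD z r))).symm
          rw [List.reverse_cons, hr, transCnt_append_single, ← hr, ih, hzr]
          simp only [transCnt]
          by_cases hxy : x = y
          · subst hxy; simp
          · rw [if_pos (fun hc => hxy hc.symm), if_pos hxy]; omega

/-- The transition count of `true :: reverse q` is the forward transition
    count of `q` plus the last-element boundary term, for nonempty `q`. -/
theorem transCnt_true_reverse (x : Bool) (t : List Bool) :
    transCnt (true :: (x :: t).reverse)
      = transCnt (x :: t) + (if t.getLastD x then 0 else 1) := by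
  obtain ⟨z, r, hr⟩ := List.exists_cons_of_ne_nil (l := (x :: t).reverse) (by simp)
  have h2 : (z :: r).head? = some (t.getLastD x) := by
    rw [← hr, List.head?_reverse]; exact getLast?_consD x t
  have hz : z = t.getLastD x := Option.some.inj h2
  rw [hr]
  simp only [transCnt]
  rw [← hr, transCnt_reverse]
  subst hz
  cases t.getLastD x <;> simp <;> omega

-- ===== VERDICT (by name: the statement is the Claim_ definition above) =====
theorem solve_spec : Claim_equal_solve := by
  intro p _
  unfold Spec_solve solve solve_alt
  rw [List.map_reverse]
  cases hqc : p.toList.map (fun c => c == '+') with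
  | nil => simp
  | cons x t =>
      rw [foldA_eq]
      dsimp only
      have hB := foldB_eq (x :: t) 0
      simp only [List.tail_cons] at hB
      rw [hB, transCnt_true_reverse]
      omega
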